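-- pv_equiv track=rewrite | github.com/Tupatuko2023/Python-R-Scripts | Quantify-FOF-Utilization-Costs/scripts/31_qc_table3.py | _required_diagnosis_rows_present
-- ===== SOURCE A (Python) =====
-- from typing import Dict, List, Sequence, Tuple
--
-- def _required_diagnosis_rows_present(rows: List[Dict[str, str]]) -> Tuple[bool, List[str]]:
--     need = {
--         "S00-09",
--         "S10-19",
--         "S20-29",
--         "S30-39",
--         "S40-49",
--         "S50-59",
--         "S60-69",
--         "S70-79",
--         "S80-89",
--         "S90-99",
--         "T00-14",
--         "Total",
--         "Treatment periods",
--     }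
--     got = {
--         ((row.get("Diagnosis") or "").strip())
--         for row in rows
--         if (row.get("Diagnosis") or "").strip()
--     }
--     missing = sorted(need - got)
--     return (len(missing) == 0, missing)
-- ===== SOURCE B (Python) =====
-- from typing import Dict, List, Tuple
--
-- def _required_diagnosis_rows_present(rows: List[Dict[str, str]]) -> Tuple[bool, List[str]]:
--     # Single pass over rows, striking each seen label off a pre-sorted worklist;
--     # whatever survives the pass is the (already sorted) missing list.
--     remaining = [
--         "S00-09", "S10-19", "S20-29", "S30-39", "S40-49", "S50-59",
--         "S60-69", "S70-79", "S80-89", "S90-99", "T00-14", "Total",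
--         "Treatment periods",
--     ]
--     for row in rows:
--         if not remaining:
--             break
--         v = row.get("Diagnosis")
--         label = v.strip() if v else ""
--         if label in remaining:
--             remaining.remove(label)
--     return (not remaining, remaining)
-- ===== Notes on version B (the rewrite author's own statement) =====
-- stated objective: alternative
-- what changed: B replaces A's built 'got' set, set difference and final sort by a single pass over rows that strikes each seen normalized label off a pre-sorted worklist (with early exit when empty); the surviving worklist is the missing list.
import Mathlib
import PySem

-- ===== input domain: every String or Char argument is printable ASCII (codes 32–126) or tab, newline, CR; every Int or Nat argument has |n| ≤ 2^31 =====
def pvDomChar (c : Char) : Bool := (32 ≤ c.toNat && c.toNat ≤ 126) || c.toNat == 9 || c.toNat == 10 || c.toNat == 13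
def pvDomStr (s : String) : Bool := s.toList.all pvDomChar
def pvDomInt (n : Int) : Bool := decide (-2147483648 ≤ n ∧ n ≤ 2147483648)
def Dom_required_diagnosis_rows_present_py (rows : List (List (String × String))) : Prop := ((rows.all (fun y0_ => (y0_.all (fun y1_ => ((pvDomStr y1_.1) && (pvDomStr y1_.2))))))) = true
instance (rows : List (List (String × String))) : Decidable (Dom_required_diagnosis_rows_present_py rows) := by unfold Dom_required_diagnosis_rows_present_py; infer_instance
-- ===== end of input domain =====

-- B replaces A's "build a `got` set, set-difference, sort" by one pass over rows that strikes
-- each seen normalized label off a pre-sorted worklist; the survivors are the missing labels.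

-- ===== PORT A =====
-- A's normalization `(row.get("Diagnosis") or "").strip()`:
-- `or ""` maps both a missing key (None) and "" to "", i.e. `getD … ""`.
def pvNormA (row : List (String × String)) : String :=
  PySem.Str.strip ((PySem.Dict.mk row).getD "Diagnosis" "")

-- the `need` set literal, in A's source order
def pvNeedList : List String :=
  ["S00-09", "S10-19", "S20-29", "S30-39", "S40-49", "S50-59", "S60-69",
   "S70-79", "S80-89", "S90-99", "T00-14", "Total", "Treatment periods"]

def required_diagnosis_rows_present_py (rows : List (List (String × String))) : Bool × List String :=
  let need : PySem.Set String := PySem.Set.ofList pvNeedList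
  -- set comprehension: {norm(row) for row in rows if norm(row)}
  let got : PySem.Set String :=
    PySem.Set.ofList ((rows.filter (fun row => !(pvNormA row == ""))).map pvNormA)
  let missing := PySem.List.sorted (PySem.Set.diff need got) (fun x => x) false
  (missing.length == 0, missing)

-- ===== PORT B =====
-- B's `v = row.get("Diagnosis"); label = v.strip() if v else ""`
def pvLabelB (row : List (String × String)) : String :=
  match (PySem.Dict.mk row).get? "Diagnosis" with
  | none => ""
  | some v => if v == "" then "" else PySem.Str.strip v

-- the for-loop with its early `break`: worklist recursion over the rows
def pvStrike : List String → List (List (String × String)) → List String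
  | [], _ => []                      -- `if not remaining: break`
  | remaining, [] => remaining
  | remaining, row :: rest =>
      let label := pvLabelB row
      pvStrike (if remaining.contains label then remaining.erase label else remaining) rest

def required_diagnosis_rows_present_py_alt (rows : List (List (String × String))) : Bool × List String :=
  let remaining := pvStrike
    ["S00-09", "S10-19", "S20-29", "S30-39", "S40-49", "S50-59", "S60-69",
     "S70-79", "S80-89", "S90-99", "T00-14", "Total", "Treatment periods"] rows
  (remaining.isEmpty, remaining)

-- ===== PRECONDITION & SPEC =====
def Spec_required_diagnosis_rows_present_py (rows : List (List (String × String))) (out : Bool × List String) : Prop := out = required_diagnosis_rows_present_py_alt rows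
instance (rows : List (List (String × String))) (out : Bool × List String) : Decidable (Spec_required_diagnosis_rows_present_py rows out) := by unfold Spec_required_diagnosis_rows_present_py; infer_instance

-- ===== CLAIM (what is proved, stated in full; the proofs are below) =====
def Claim_equal_required_diagnosis_rows_present_py : Prop := ∀ (rows : List (List (String × String))), Dom_required_diagnosis_rows_present_py rows → Spec_required_diagnosis_rows_present_py rows (required_diagnosis_rows_present_py rows)

-- ===== LEMMAS AND PROOFS =====

-- the two normalizations agree (strip "" = "")
theorem pv_label_eq_norm (row : List (String × String)) : pvLabelB row = pvNormA row := by
  unfold pvLabelB pvNormA PySem.Dict.getD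
  cases h : (PySem.Dict.mk row).get? "Diagnosis" with
  | none => rfl
  | some v =>
    by_cases hv : v = ""
    · subst hv; rfl
    · simp [hv]

-- the worklist pass computes a filter, for a duplicate-free worklist
theorem pv_strike_eq_filter (rows : List (List (String × String))) :
    ∀ (rem : List String), rem.Nodup →
      pvStrike rem rows = rem.filter (fun l => !(rows.any (fun row => pvNormA row == l))) := by
  induction rows with
  | nil =>
    intro rem _
    cases rem <;> simp [pvStrike]
  | cons row rest ih =>
    intro rem hnd
    cases rem with
    | nil => simp [pvStrike]
    | cons a tl =>
      have hstep : (if (a :: tl).contains (pvLabelB row) then (a :: tl).erase (pvLabelB row) else (a :: tl))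
          = (a :: tl).erase (pvLabelB row) := by
        by_cases h : (a :: tl).contains (pvLabelB row)
        · rw [if_pos h]
        · rw [if_neg h, List.erase_of_not_mem (by simpa using h)]
      have herase : (a :: tl).erase (pvLabelB row)
          = (a :: tl).filter (fun l => !(pvNormA row == l)) := by
        rw [hnd.erase_eq_filter]
        apply List.filter_congr
        intro x _
        simp [pv_label_eq_norm, bne, BEq.comm]
      rw [show pvStrike (a :: tl) (row :: rest)
            = pvStrike (if (a :: tl).contains (pvLabelB row) then (a :: tl).erase (pvLabelB row) else (a :: tl)) rest
          from rfl, hstep, herase,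
        ih _ ((hnd.filter _)), List.filter_filter]
      apply List.filter_congr
      intro x _
      simp only [List.any_cons, Bool.not_or, Bool.and_comm]

-- membership in A's `got` set, for a nonempty label, is an `any` scan over rows
theorem pv_contains_eq_any (rows : List (List (String × String))) (l : String) (hl : l ≠ "") :
    PySem.Set.contains (PySem.Set.ofList ((rows.filter (fun row => !(pvNormA row == ""))).map pvNormA)) l
      = rows.any (fun row => pvNormA row == l) := by
  rw [Bool.eq_iff_iff]
  simp [PySem.Set.mem_ofList, List.mem_filter, List.any_eq_true]
  constructor
  · rintro ⟨row, ⟨hrow, _⟩, hl'⟩; exact ⟨row, hrow, hl'⟩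
  · rintro ⟨row, hrow, hl'⟩; exact ⟨row, ⟨hrow, by rw [hl']; exact hl⟩, hl'⟩

theorem pv_need_pairwise : List.Pairwise (· < ·) pvNeedList := by
  apply List.IsChain.pairwise
  simp [pvNeedList, List.isChain_cons, String.lt_iff_toList_lt]
  and_intros <;> decide

theorem required_diagnosis_rows_present_py_spec_aux (rows : List (List (String × String))) :
    required_diagnosis_rows_present_py rows = required_diagnosis_rows_present_py_alt rows := by
  simp only [required_diagnosis_rows_present_py, required_diagnosis_rows_present_py_alt]
  have hofl : PySem.Set.ofList pvNeedList = pvNeedList := by decide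
  have hdiff : ∀ (t : List String),
      PySem.Set.diff (PySem.Set.ofList pvNeedList) t
        = pvNeedList.filter (fun x => !(PySem.Set.contains t x)) := by
    intro t; rw [hofl]; rfl
  rw [hdiff]
  rw [PySem.List.sorted_eq_of_perm_of_pairwise_lt _ _ (fun x => x) (List.Perm.refl _)
        (List.Pairwise.filter _ pv_need_pairwise)]
  have hfil :
      pvNeedList.filter (fun x =>
          !(PySem.Set.contains (PySem.Set.ofList ((rows.filter (fun row => !(pvNormA row == ""))).map pvNormA)) x))
        = pvNeedList.filter (fun l => !(rows.any (fun row => pvNormA row == l))) := by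
    apply List.filter_congr
    intro x hx
    have hne : x ≠ "" := by fin_cases hx <;> decide
    rw [pv_contains_eq_any rows x hne]
  rw [hfil, ← pv_strike_eq_filter rows pvNeedList (by decide)]
  have hlit : pvStrike
      ["S00-09", "S10-19", "S20-29", "S30-39", "S40-49", "S50-59", "S60-69",
       "S70-79", "S80-89", "S90-99", "T00-14", "Total", "Treatment periods"] rows
      = pvStrike pvNeedList rows := rfl
  rw [hlit]
  cases pvStrike pvNeedList rows <;> rfl

-- ===== VERDICT (by name: the statement is the Claim_ definition above) =====
theorem required_diagnosis_rows_present_py_spec : Claim_equal_required_diagnosis_rows_present_py := by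
  intro rows _
  unfold Spec_required_diagnosis_rows_present_py
  exact required_diagnosis_rows_present_py_spec_aux rows
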